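/- GENERATED by mk_final_copies.py from the proof of the farm's unit `start_decoder.R11` (farm:start_decoder.R11.1: Lemmas.lean) as the
   re-elaboration sweep compiled it — do not edit. -/
import Asan.CheckWalk
import Vorbis.Spec.Units.start_decoder_R11
import Vorbis.Spec.StartDecoderBTest

/-!
  Pure lemmas of unit `start_decoder.R11` (no machine walk here): where `*f` is, and THE CARRY of the mapping loop's assertion
  (`MapLoop` + `MapCur … 11`) over a change of memory that leaves alone what the assertion reads — a callee that writes
  bit-reader fields of `*f` and the stack below `R` (`get_bits`, `error`), the spill `[R + 18H]`, a byte of `chan`.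
-/

open X86 X86.User Asan Vorbis Vorbis.Spec Vorbis.Spec.StartDecoder

namespace Vorbis.Spec.start_decoder_R11

/-- **Where `*f` is**: above the text, in the data space, and off start_decoder's own stack (it is a stack object of a CALLER's
protected frame, above the return-address slot, or an object of `others`, off the stack region). -/
theorem f_where {u₀ : State} {g : Ghost} {pc : Word} {A : Arena × List Obj} {v : State}
    (hfr : Frame u₀ g pc A v) (hhand : g.Hand A) :
    0x119d40 ≤ g.f ∧ g.f + 1808 ≤ 0xC00000 ∧ (g.RA + 8 ≤ g.f ∨ g.f + 1808 ≤ 0x700000 ∨ 0x800000 ≤ g.f) := by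
  have hobj : LiveIn A.2 g.frames g.f Off.sizeof.stb_vorbis := hhand.obj
  have hobj' : LiveIn A.2 g.frames' g.f Off.sizeof.stb_vorbis := hobj.mono (frames'_sub g A.2)
  have hw := hobj'.where_ hfr.shadow hfr.offText (by decide)
  simp only [voff] at hw
  obtain ⟨w1, w2, _⟩ := hw
  refine ⟨w1, w2, ?_⟩
  obtain ⟨o, ho, k1, k2⟩ := hobj
  simp only [voff] at k2
  rcases List.mem_append.mp ho with hs | hoth
  · left
    unfold stackObjs at hs
    obtain ⟨bF, hbF, hin⟩ := List.mem_flatMap.mp hs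
    have hc := hfr.callers bF hbF
    have hmem : bF ∈ g.frames' := List.mem_cons_of_mem _ hbF
    obtain ⟨a1, a2, _, _, _⟩ := hfr.shadow.stack.active bF hmem
    obtain ⟨g1, _⟩ := FrameLayout.objsAt_gran a1 a2 hin
    have e : o.gLo = o.base / 8 := rfl
    have hra := hfr.ra
    omega
  · have hoff := hfr.shadow.off o hoth
    unfold OffStack at hoff
    omega

/-- Two different members of a list that is pairwise in a symmetric relation are related. -/
theorem pairwise_ne {α : Type} {R : α → α → Prop} (hs : ∀ a b, R a b → R b a) :
    ∀ {l : List α}, l.Pairwise R → ∀ a b, a ∈ l → b ∈ l → a ≠ b → R a b := by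
  intro l
  induction l with
  | nil =>
    intro _ a b ha
    exact absurd ha List.not_mem_nil
  | cons x l ih =>
    intro hp a b ha hb hne
    obtain ⟨hx, hl⟩ := List.pairwise_cons.mp hp
    rcases List.mem_cons.mp ha with rfl | ha'
    · rcases List.mem_cons.mp hb with rfl | hb'
      · exact absurd rfl hne
      · exact hx b hb'
    · rcases List.mem_cons.mp hb with rfl | hb'
      · exact hs _ _ (hx a ha')
      · exact ih hl a b ha' hb' hne

/-- **`*f` does not meet the global `log2_4`**: both lie in live objects (SH3: no two objects share a granule), and the object of
`*f` has at least 1808 bytes. -/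
theorem f_off_log2 {u₀ : State} {g : Ghost} {pc : Word} {A : Arena × List Obj} {v : State}
    (hfr : Frame u₀ g pc A v) (hhand : g.Hand A) : g.f + 1808 ≤ 0x120640 ∨ 0x120650 ≤ g.f := by
  have hobj : LiveIn A.2 g.frames' g.f Off.sizeof.stb_vorbis := hhand.obj.mono (frames'_sub g A.2)
  obtain ⟨o, ho, k1, k2⟩ := hobj
  simp only [voff] at k2
  have hl : Vorbis.Globals.log2_4.obj ∈ stackObjs g.frames' ++ A.2 := List.mem_append_right _ hhand.toHand.g_log2
  have hpw := hfr.shadow.shadow.disjoint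
  by_cases e : o = Vorbis.Globals.log2_4.obj
  · subst e
    simp only [Vorbis.Globals.log2_4, GlobalDesc.obj] at k1 k2
    omega
  · have hd : GranDisj o Vorbis.Globals.log2_4.obj := pairwise_ne (fun _ _ h => GranDisj.symm h) hpw o _ ho hl e
    unfold GranDisj Obj.gLo Obj.gHi at hd
    simp only [Vorbis.Globals.log2_4, GlobalDesc.obj] at hd
    omega

/-- The windows of `*f` that the assertion of the mapping loop reads (everything but the bit reader's / `error`'s fields). -/
def quietWins : Wins := [(0, 48), (112, 136), (152, 1480), (1749, 1750), (1784, 1788)]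

/-- **A change of memory `mem → mem'` inside segment R11 that the assertion survives**: the windows `quietWins` of `*f`, every block
older than iteration `i` (`Ai.Blk`: the configuration, the mapping table, the finished `chan` blocks), the bytes of the `chan`
block under construction but the `mux` byte of channel `jx`, the frame's constant slots and saved registers, the shadow, `log2_4` read the same;
and the change lies inside the function's footprint. -/
structure Quiet (g : Ghost) (Ai : Arena) (i jx : Nat) (mem mem' : Mem) : Prop where
  obj : ObjEq quietWins mem g.f mem' g.f
  old : AllKept Ai.Blk mem mem'
  chan : ∀ k o : Nat, (k : Int) < stb_vorbis.channels mem g.f → o < 3 → (o = 2 → k ≠ jx) →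
    mem'.u8 (Mapping.chan_at mem (mapAt g mem i) k + o) = mem.u8 (Mapping.chan_at mem (mapAt g mem i) k + o)
  lo : Mem.EqOn (g.R + 8) (g.R + 0x18) mem mem'
  mid : Mem.EqOn (g.R + 0x20) (g.R + 0x2c) mem mem'
  hi : Mem.EqOn (g.R + 0x598) (g.R + 0x5d0) mem mem'
  shadow : ShadowUntouched mem mem'
  log2 : Mem.EqOn 0x120640 0x120650 mem mem'
  foot : Mem.SameExcept (footprint g) mem mem'

/-- A window of `*f` that reads the same, as a region. -/
theorem Quiet.eqOn_obj {g : Ghost} {Ai : Arena} {i jx : Nat} {mem mem' : Mem} (q : Quiet g Ai i jx mem mem')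
    (w : Nat × Nat) (hw : w ∈ quietWins) : Mem.EqOn (g.f + w.1) (g.f + w.2) mem mem' := by
  intro a h1 h2
  have h := q.obj w hw (a.toNat - g.f) (by omega) (by omega)
  have e : g.f + (a.toNat - g.f) = a.toNat := by omega
  rw [e, addr_toNat] at h
  exact h

/-- The frame constants of SD.8 (`shadowIdx`, ONE20, Z24; Z10 is gone) over a quiet change. -/
theorem Quiet.consts {g : Ghost} {Ai : Arena} {i jx : Nat} {mem mem' : Mem} (q : Quiet g Ai i jx mem mem')
    (h : SDFrameConsts 8 mem g.R) (hR : g.R + 0x5d0 ≤ 2 ^ 64) : SDFrameConsts 8 mem' g.R := by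
  obtain ⟨h1, h2, h3, _, h5⟩ := h
  refine ⟨h1, ?_, ?_, ?_, ?_⟩
  · rw [q.lo.u64 (g.R + 8) (by omega) (by omega) (by omega)]
    exact h2
  · rw [q.mid.u32 (g.R + 0x20) (by omega) (by omega) (by omega)]
    exact h3
  · intro hk
    omega
  · intro hk1 hk2
    rw [q.mid.u32 (g.R + 0x24) (by omega) (by omega) (by omega)]
    exact h5 hk1 hk2

/-- **`Frame` over a quiet change**, at the state `s` with the new program counter. -/
theorem Quiet.frame {u₀ : State} {g : Ghost} {Ai : Arena} {i jx : Nat} {pc pc' : Word} {A : Arena × List Obj} {v s : State}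
    (q : Quiet g Ai i jx v.mem s.mem) (hfr : Frame u₀ g pc A v) (hrip : s.rip = pc') (hrsp : s.reg .rsp = addr g.R)
    (hcode : CodeOK u₀ s.mem) (hinv : abiInv s) : Frame u₀ g pc' A s := by
  have hra := hfr.ra
  have hr := hfr.r_eq
  simp only [depth, steady] at hra hr
  have hR : g.R + 0x5d0 ≤ 2 ^ 64 := by omega
  refine ⟨hfr.entry, hrip, hrsp, ?_, ?_, ?_, ?_, ?_, ?_, ?_, ?_, hcode, hinv, hfr.shadow.untouched q.shadow, hfr.offText,
    hfr.ext, hfr.callers, ?_, hfr.same.trans q.foot⟩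
  · rw [q.lo.u64 (g.R + 8) (by omega) (by omega) (by omega)]
    exact hfr.shadowIdx
  · rw [q.hi.u64 (g.R + 0x598) (by omega) (by omega) (by omega)]
    exact hfr.saved_rbx
  · rw [q.hi.u64 (g.R + 0x5a0) (by omega) (by omega) (by omega)]
    exact hfr.saved_rbp
  · rw [q.hi.u64 (g.R + 0x5a8) (by omega) (by omega) (by omega)]
    exact hfr.saved_r12
  · rw [q.hi.u64 (g.R + 0x5b0) (by omega) (by omega) (by omega)]
    exact hfr.saved_r13
  · rw [q.hi.u64 (g.R + 0x5b8) (by omega) (by omega) (by omega)]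
    exact hfr.saved_r14
  · rw [q.hi.u64 (g.R + 0x5c0) (by omega) (by omega) (by omega)]
    exact hfr.saved_r15
  · rw [q.hi.u64 (g.R + 0x5c8) (by omega) (by omega) (by omega)]
    exact hfr.saved_ra
  · intro k hk
    have e := q.log2.readLE_addr (Vorbis.Globals.log2_4.beg + k) 1 (by simp only [Vorbis.Globals.log2_4]; omega)
      (by simp only [Vorbis.Globals.log2_4]; omega) (by omega)
    have h0 := hfr.sh7 k hk
    unfold addr at e
    rw [e]
    exact h0

/-- **`Mid g 7 8 8` over a quiet change** (`Mid.frame`): the record reads blocks of `A7` only, which are older than `Ai`. -/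
theorem Quiet.mid_carry {g : Ghost} {A7 Ai : Arena} {i jx : Nat} {A : Arena × List Obj} {mem mem' : Mem}
    (q : Quiet g Ai i jx mem mem') (h : Mid g 7 8 8 A7 A mem) (hext : A7.Extends Ai) (hR : g.R + 0x5d0 ≤ 2 ^ 64)
    (hf : g.f + 1808 ≤ 2 ^ 64) (hbits : Bits (g.Blk A) g.len mem' g.f) : Mid g 7 8 8 A7 A mem' := by
  apply h.frame
  · -- the windows of `*f`
    apply q.obj.sub
    intro w hw
    have e1 : Mid.hi 7 = 464 := by decide
    have e2 : restFrom 8 = 480 := by decide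
    simp only [Mid.winsAt, e1, e2, List.mem_cons, List.mem_nil_iff, or_false] at hw
    rcases hw with rfl | rfl | rfl | rfl | rfl | rfl
    · exact ⟨(0, 48), by simp only [quietWins, List.mem_cons, true_or], by simp only []; omega, by simp only []; omega⟩
    · exact ⟨(0, 48), by simp only [quietWins, List.mem_cons, true_or], by simp only []; omega, by simp only []; omega⟩
    · exact ⟨(152, 1480), by simp only [quietWins, List.mem_cons, true_or, or_true], by simp only []; omega,
        by simp only []; omega⟩
    · exact ⟨(152, 1480), by simp only [quietWins, List.mem_cons, true_or, or_true], by simp only []; omega,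
        by simp only []; omega⟩
    · exact ⟨(1749, 1750), by simp only [quietWins, List.mem_cons, true_or, or_true], by simp only []; omega,
        by simp only []; omega⟩
    · exact ⟨(1784, 1788), by simp only [quietWins, List.mem_cons, List.mem_nil_iff, or_false, or_true],
        by simp only []; omega, by simp only []; omega⟩
  · intro B hB
    exact q.old B (hB.mono hext)
  · exact q.consts h.consts hR
  · intro _ _
    unfold Mem.i32
    rw [q.mid.u32 (g.R + 0x28) (by omega) (by omega) (by omega)]
  · exact q.shadow
  · apply h.arena.frame (by simp only [voff]; omega)
    have e := q.eqOn_obj (112, 136) (by simp only [quietWins, List.mem_cons, true_or, or_true])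
    simp only [voff]
    exact e
  · exact hbits

/-- The scalars of `*f` that the mapping clauses compare with, and the mapping table's fields, over a quiet change. -/
theorem Quiet.scalars {g : Ghost} {Ai : Arena} {i jx : Nat} {mem mem' : Mem} (q : Quiet g Ai i jx mem mem') :
    stb_vorbis.channels mem' g.f = stb_vorbis.channels mem g.f ∧
      stb_vorbis.mapping_count mem' g.f = stb_vorbis.mapping_count mem g.f ∧
      stb_vorbis.mapping mem' g.f = stb_vorbis.mapping mem g.f := by
  have m0 : ((0, 48) : Nat × Nat) ∈ quietWins := by simp only [quietWins, List.mem_cons, true_or]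
  have m2 : ((152, 1480) : Nat × Nat) ∈ quietWins := by simp only [quietWins, List.mem_cons, true_or, or_true]
  refine ⟨?_, ?_, ?_⟩
  · simp only [vacc, voff]
    exact q.obj.i32 4 ⟨(0, 48), m0, by simp only []; omega, by simp only []; omega⟩
  · simp only [vacc, voff]
    exact q.obj.i32 464 ⟨(152, 1480), m2, by simp only []; omega, by simp only []; omega⟩
  · simp only [vacc, voff]
    exact q.obj.u64 472 ⟨(152, 1480), m2, by simp only []; omega, by simp only []; omega⟩

/-- The windows of `*f` that one mapping record compares with are quiet. -/
theorem Quiet.atWins {g : Ghost} {Ai : Arena} {i jx : Nat} {mem mem' : Mem} (q : Quiet g Ai i jx mem mem') :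
    ObjEq MappingAtOK.wins mem g.f mem' g.f := by
  apply q.obj.sub
  intro w hw
  have m0 : ((0, 48) : Nat × Nat) ∈ quietWins := by simp only [quietWins, List.mem_cons, true_or]
  have m2 : ((152, 1480) : Nat × Nat) ∈ quietWins := by simp only [quietWins, List.mem_cons, true_or, or_true]
  simp only [MappingAtOK.wins, List.mem_cons, List.mem_nil_iff, or_false] at hw
  rcases hw with rfl | rfl | rfl
  · exact ⟨(0, 48), m0, by simp only []; omega, by simp only []; omega⟩
  · exact ⟨(152, 1480), m2, by simp only []; omega, by simp only []; omega⟩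
  · exact ⟨(152, 1480), m2, by simp only []; omega, by simp only []; omega⟩

/-- **The record `i' < mapping_count` of the mapping table is kept** by a quiet change (the table is older than `Ai`). -/
theorem Quiet.record_kept {g : Ghost} {A7 A7c Ai A : Arena} {i jx : Nat} {mem mem' : Mem} (q : Quiet g Ai i jx mem mem')
    (h : MapTrans A7 A7c Ai A mem g.f i) (i' : Nat) (hi' : (i' : Int) < stb_vorbis.mapping_count mem g.f) :
    (Block.mk (stb_vorbis.mapping_at mem g.f i') Off.sizeof.Mapping).Kept mem mem' := by
  have hk := q.old _ (h.MP1_block.1.mono h.ext7c)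
  have h1 := h.MP1
  apply hk.mono
  · simp only [vacc, voff]
    omega
  · simp only [vacc, voff] at hi' ⊢
    omega

/-- **MAPS(i) (`MapTrans`) over a quiet change.** -/
theorem Quiet.maps_carry {g : Ghost} {A7 A7c Ai A : Arena} {i jx : Nat} {mem mem' : Mem} (q : Quiet g Ai i jx mem mem')
    (h : MapTrans A7 A7c Ai A mem g.f i) : MapTrans A7 A7c Ai A mem' g.f i := by
  obtain ⟨eC, ecnt, emap⟩ := q.scalars
  refine ⟨h.ext7, h.ext7c, h.exti, ?_, ?_, ?_, ?_⟩
  · rw [ecnt]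
    exact h.n_le
  · rw [ecnt]
    exact h.MP1
  · rw [ecnt, emap]
    exact h.MP1_block
  · intro i' hi'
    have hn := h.n_le
    have hlt : (i' : Int) < stb_vorbis.mapping_count mem g.f := by omega
    have hrec := h.record i' hi'
    have eat : stb_vorbis.mapping_at mem' g.f i' = stb_vorbis.mapping_at mem g.f i' := by
      simp only [stb_vorbis.mapping_at]
      rw [emap]
    rw [eat]
    exact hrec.frame q.atWins (q.record_kept h i' hlt) (q.old _ hrec.MP2.1) hrec.MP2

/-- **The record under construction (`MapCur … 11`: MP2 – MP4) over a quiet change.** -/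
theorem Quiet.cur_carry {g : Ghost} {A7 A7c Ai A : Arena} {i jx : Nat} {mem mem' : Mem} (q : Quiet g Ai i jx mem mem')
    (ht : MapTrans A7 A7c Ai A mem g.f i) (h : MapCur g (Since Ai A) mem i 11) :
    MapCur g (Since Ai A) mem' i 11 ∧ mapAt g mem' i = mapAt g mem i := by
  obtain ⟨eC, ecnt, emap⟩ := q.scalars
  have hm := q.record_kept ht i h.lt
  have eat : mapAt g mem' i = mapAt g mem i := by
    unfold mapAt
    simp only [stb_vorbis.mapping_at]
    rw [emap]
  have hn : nchan mem' g.f = nchan mem g.f := by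
    rw [nchan_def, nchan_def, eC]
  have e1 : Mapping.chan mem' (mapAt g mem i) = Mapping.chan mem (mapAt g mem i) := by
    simp only [vacc, voff]
    exact hm.u64 _ (by simp only [mapAt]; omega) (by simp only [mapAt, voff]; omega)
  have e2 : Mapping.submaps mem' (mapAt g mem i) = Mapping.submaps mem (mapAt g mem i) := by
    simp only [vacc, voff]
    exact hm.u8 _ (by simp only [mapAt]; omega) (by simp only [mapAt, voff]; omega)
  have e3 : Mapping.coupling_steps mem' (mapAt g mem i) = Mapping.coupling_steps mem (mapAt g mem i) := by
    simp only [vacc, voff]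
    exact hm.u16 _ (by simp only [mapAt]; omega) (by simp only [mapAt, voff]; omega)
  refine ⟨⟨?_, ?_, ?_, ?_, ?_, ?_, ?_⟩, eat⟩
  · rw [ecnt]
    exact h.lt
  · rw [eat, e1, hn]
    exact h.MP2
  · rw [eat, e2]
    exact h.MP3
  · rw [eat, e3, eC]
    exact h.MP4_steps
  · intro h10
    omega
  · intro _ k hk
    rw [eat, e3] at hk
    have h4s := h.MP4_steps
    have hkC : (k : Int) < stb_vorbis.channels mem g.f := by omega
    have h4 := h.MP4 (by omega) k hk
    rw [eat]
    unfold Mapping.CouplingOK at h4 ⊢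
    have ech : Mapping.chan_at mem' (mapAt g mem i) k = Mapping.chan_at mem (mapAt g mem i) k := by
      unfold Mapping.chan_at
      rw [e1]
    have c0 := q.chan k 0 hkC (by omega) (by omega)
    have c1 := q.chan k 1 hkC (by omega) (by omega)
    simp only [MappingChannel.magnitude, MappingChannel.angle, voff] at h4 ⊢
    rw [ech, c0, c1, eC]
    exact h4
  · intro h12
    omega

/-- **THE CARRY**: the mapping loop's assertion and the record under construction at the state `s` (new program counter), after
a quiet change of memory since the state `v`. `Bits` for the new memory is the caller's (the reader's post, or `Bits.frame…`). -/
theorem Quiet.carry {u₀ : State} {g : Ghost} {A7 A7c Ai : Arena} {A : Arena × List Obj} {i jx : Nat} {pc pc' : Word} {v s : State}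
    (q : Quiet g Ai i jx v.mem s.mem) (hl : MapLoop u₀ g pc i A7 A7c Ai A v) (hc : MapCur g (Since Ai A.1) v.mem i 11)
    (hbits : Bits (g.Blk A) g.len s.mem g.f) (hrip : s.rip = pc') (hrsp : s.reg .rsp = addr g.R)
    (hrbp : s.reg .rbp = addr g.f) (hcode : CodeOK u₀ s.mem) (hinv : abiInv s) :
    MapLoop u₀ g pc' i A7 A7c Ai A s ∧ MapCur g (Since Ai A.1) s.mem i 11 ∧ mapAt g s.mem i = mapAt g v.mem i := by
  have hra := hl.frame.ra
  have hr := hl.frame.r_eq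
  simp only [depth, steady] at hra hr
  have hR : g.R + 0x5d0 ≤ 2 ^ 64 := by omega
  have hfw := f_where hl.frame hl.hand
  have hf : g.f + 1808 ≤ 2 ^ 64 := by omega
  obtain ⟨eC, ecnt, emap⟩ := q.scalars
  obtain ⟨hc', eat⟩ := q.cur_carry hl.maps hc
  refine ⟨⟨q.frame hl.frame hrip hrsp hcode hinv, hl.hand, ?_, hrbp, ?_, ?_, q.maps_carry hl.maps⟩, hc', eat⟩
  · exact q.mid_carry hl.mid (hl.maps.ext7.trans hl.maps.ext7c) hR hf hbits
  · unfold StartDecoder.slot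
    rw [q.lo.u32 (g.R + 0x10) (by omega) (by omega) (by omega)]
    exact hl.cnt
  · rw [ecnt]
    exact hl.i_le

/-- **What the callees and the spill of segment R11 may write**: the stack below `R` (the return addresses and the callees' frames:
`get_bits` needs 352 bytes), the spill slot `[R + 18H]`, and the bit reader's windows of `*f` (`error`'s `[f + 140, f + 144)` lies
in the third). -/
def offWins (g : Ghost) : List Span :=
  [⟨g.R - 400, g.R⟩, ⟨g.R + 0x18, g.R + 0x1c⟩, ⟨g.f + 48, g.f + 56⟩, ⟨g.f + 84, g.f + 96⟩, ⟨g.f + 136, g.f + 144⟩,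
   ⟨g.f + 1484, g.f + 1749⟩, ⟨g.f + 1752, g.f + 1784⟩]

set_option maxRecDepth 4000 in
/-- **A change inside `offWins` is quiet**: it meets no arena block (they are off the stack and `*f` is outside the arena's
buffer), no window of `*f` the assertion reads, no constant slot of the frame, not the shadow, not `log2_4`. -/
theorem Quiet.of_off {u₀ : State} {g : Ghost} {A7 A7c Ai : Arena} {A : Arena × List Obj} {i : Nat} {pc : Word} {v : State}
    {mem' : Mem} (hl : MapLoop u₀ g pc i A7 A7c Ai A v) (hc : MapCur g (Since Ai A.1) v.mem i 11)
    (hs : Mem.SameExcept (offWins g) v.mem mem') (jx : Nat) : Quiet g Ai i jx v.mem mem' := by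
  have hra := hl.frame.ra
  have hr := hl.frame.r_eq
  simp only [depth, steady] at hra hr
  have hfw := f_where hl.frame hl.hand
  have hlog := f_off_log2 hl.frame hl.hand
  have ha : ArenaOK A.1 A.2 v.mem g.f := hl.mid.arena
  have hout := hl.hand.objOut
  simp only [voff] at hout
  -- every block of the present arena is kept
  have hall : AllKept A.1.Blk v.mem mem' := by
    apply AllKept.of_sameExcept ha.blkOK hs
    intro B hB w hw
    have h1 := ha.blk_off_stack hB
    have h2 := arena_inside ha hB
    simp only [offWins, List.mem_cons, List.mem_nil_iff, or_false] at hw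
    rcases hw with rfl | rfl | rfl | rfl | rfl | rfl | rfl
    all_goals simp only []
    all_goals omega
  -- a region that meets no window reads the same
  have hreg : ∀ lo hi : Nat, (hi ≤ g.R - 400 ∨ g.R + 0x1c ≤ lo ∨ (g.R ≤ lo ∧ hi ≤ g.R + 0x18)) →
      (hi ≤ g.f + 48 ∨ g.f + 1784 ≤ lo) → Mem.EqOn lo hi v.mem mem' := by
    intro lo hi h1 h2
    apply hs.eqOn
    intro w hw
    simp only [offWins, List.mem_cons, List.mem_nil_iff, or_false] at hw
    rcases hw with rfl | rfl | rfl | rfl | rfl | rfl | rfl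
    all_goals simp only []
    all_goals omega
  refine ⟨?_, ?_, ?_, ?_, ?_, ?_, ?_, ?_, ?_⟩
  · -- the windows of `*f`
    apply ObjEq.of_sameExcept hs
    · intro w hw
      simp only [quietWins, List.mem_cons, List.mem_nil_iff, or_false] at hw
      rcases hw with rfl | rfl | rfl | rfl | rfl
      all_goals simp only []
      all_goals omega
    · intro w hw s hsw
      simp only [quietWins, List.mem_cons, List.mem_nil_iff, or_false] at hw
      simp only [offWins, List.mem_cons, List.mem_nil_iff, or_false] at hsw
      rcases hw with rfl | rfl | rfl | rfl | rfl
      all_goals rcases hsw with rfl | rfl | rfl | rfl | rfl | rfl | rfl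
      all_goals simp only []
      all_goals omega
  · intro B hB
    exact hall B (hB.mono hl.maps.exti)
  · intro k o hk ho _
    have hkept := hall _ hc.MP2.1
    apply hkept.u8
    · simp only [vacc, voff]
      omega
    · simp only [nchan_def, vacc, voff] at hk ⊢
      omega
  · exact hreg _ _ (by omega) (by omega)
  · exact hreg _ _ (by omega) (by omega)
  · exact hreg _ _ (by omega) (by omega)
  · exact hreg _ _ (by omega) (by omega)
  · exact hreg _ _ (by omega) (by omega)
  · -- inside the function's footprint
    apply hs.mono
    intro w hw a h1 h2
    simp only [offWins, List.mem_cons, List.mem_nil_iff, or_false] at hw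
    have hRA : g.RA = (g.e.reg .rsp).toNat := rfl
    have hf' : g.f = (g.e.reg .rdi).toNat := rfl
    have hmem : (objBlock (g.e.reg .rdi).toNat).span ∈ StartDecoder.footprint g := by
      unfold StartDecoder.footprint StartDecoder.writes
      exact List.mem_cons_of_mem _ List.mem_cons_self
    have hstk : (⟨g.RA - 1888, g.RA⟩ : Span) ∈ StartDecoder.footprint g := by
      unfold StartDecoder.footprint
      exact List.mem_cons_self
    rcases hw with rfl | rfl | rfl | rfl | rfl | rfl | rfl
    all_goals simp only [] at h1 h2
    · exact ⟨_, hstk, by simp only []; omega, by simp only []; omega⟩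
    · exact ⟨_, hstk, by simp only []; omega, by simp only []; omega⟩
    all_goals
      refine ⟨_, hmem, ?_, ?_⟩
      · simp only [vblock, voff]
        omega
      · simp only [vblock, voff]
        omega

set_option maxRecDepth 4000 in
/-- **A quiet change followed by a change inside `offWins` is quiet** (the return address of a later check call on top of the
`mux` store): the geometry is that of `Quiet.of_off`, for the two later memories. -/
theorem Quiet.then_off {u₀ : State} {g : Ghost} {A7 A7c Ai : Arena} {A : Arena × List Obj} {i jx : Nat} {pc : Word} {v : State}
    {mem2 mem' : Mem} (hl : MapLoop u₀ g pc i A7 A7c Ai A v) (hc : MapCur g (Since Ai A.1) v.mem i 11)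
    (q : Quiet g Ai i jx v.mem mem2) (hs : Mem.SameExcept (offWins g) mem2 mem') : Quiet g Ai i jx v.mem mem' := by
  have hra := hl.frame.ra
  have hr := hl.frame.r_eq
  simp only [depth, steady] at hra hr
  have hfw := f_where hl.frame hl.hand
  have hlog := f_off_log2 hl.frame hl.hand
  have ha : ArenaOK A.1 A.2 v.mem g.f := hl.mid.arena
  have hout := hl.hand.objOut
  simp only [voff] at hout
  have hall : AllKept A.1.Blk mem2 mem' := by
    apply AllKept.of_sameExcept ha.blkOK hs
    intro B hB w hw
    have h1 := ha.blk_off_stack hB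
    have h2 := arena_inside ha hB
    simp only [offWins, List.mem_cons, List.mem_nil_iff, or_false] at hw
    rcases hw with rfl | rfl | rfl | rfl | rfl | rfl | rfl
    all_goals simp only []
    all_goals omega
  have hreg : ∀ lo hi : Nat, (hi ≤ g.R - 400 ∨ g.R + 0x1c ≤ lo ∨ (g.R ≤ lo ∧ hi ≤ g.R + 0x18)) →
      (hi ≤ g.f + 48 ∨ g.f + 1784 ≤ lo) → Mem.EqOn lo hi mem2 mem' := by
    intro lo hi h1 h2
    apply hs.eqOn
    intro w hw
    simp only [offWins, List.mem_cons, List.mem_nil_iff, or_false] at hw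
    rcases hw with rfl | rfl | rfl | rfl | rfl | rfl | rfl
    all_goals simp only []
    all_goals omega
  refine ⟨?_, ?_, ?_, ?_, ?_, ?_, ?_, ?_, ?_⟩
  · apply q.obj.trans
    apply ObjEq.of_sameExcept hs
    · intro w hw
      simp only [quietWins, List.mem_cons, List.mem_nil_iff, or_false] at hw
      rcases hw with rfl | rfl | rfl | rfl | rfl
      all_goals simp only []
      all_goals omega
    · intro w hw s hsw
      simp only [quietWins, List.mem_cons, List.mem_nil_iff, or_false] at hw
      simp only [offWins, List.mem_cons, List.mem_nil_iff, or_false] at hsw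
      rcases hw with rfl | rfl | rfl | rfl | rfl
      all_goals rcases hsw with rfl | rfl | rfl | rfl | rfl | rfl | rfl
      all_goals simp only []
      all_goals omega
  · intro B hB
    exact (q.old B hB).trans (hall B (hB.mono hl.maps.exti))
  · intro k o hk ho hne
    rw [← q.chan k o hk ho hne]
    have hkept := hall _ hc.MP2.1
    apply hkept.u8
    · simp only [vacc, voff]
      omega
    · simp only [nchan_def, vacc, voff] at hk ⊢
      omega
  · exact q.lo.trans (hreg _ _ (by omega) (by omega))
  · exact q.mid.trans (hreg _ _ (by omega) (by omega))
  · exact q.hi.trans (hreg _ _ (by omega) (by omega))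
  · exact Mem.EqOn.trans q.shadow (hreg _ _ (by omega) (by omega))
  · exact q.log2.trans (hreg _ _ (by omega) (by omega))
  · apply q.foot.trans
    apply hs.mono
    intro w hw a h1 h2
    simp only [offWins, List.mem_cons, List.mem_nil_iff, or_false] at hw
    have hRA : g.RA = (g.e.reg .rsp).toNat := rfl
    have hf' : g.f = (g.e.reg .rdi).toNat := rfl
    have hmem : (objBlock (g.e.reg .rdi).toNat).span ∈ StartDecoder.footprint g := by
      unfold StartDecoder.footprint StartDecoder.writes
      exact List.mem_cons_of_mem _ List.mem_cons_self
    have hstk : (⟨g.RA - 1888, g.RA⟩ : Span) ∈ StartDecoder.footprint g := by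
      unfold StartDecoder.footprint
      exact List.mem_cons_self
    rcases hw with rfl | rfl | rfl | rfl | rfl | rfl | rfl
    all_goals simp only [] at h1 h2
    · exact ⟨_, hstk, by simp only []; omega, by simp only []; omega⟩
    · exact ⟨_, hstk, by simp only []; omega, by simp only []; omega⟩
    all_goals
      refine ⟨_, hmem, ?_, ?_⟩
      · simp only [vblock, voff]
        omega
      · simp only [vblock, voff]
        omega

/-- **The assertion at an internal point `pc` of segment R11** (the entry assertion `BodyR11` at another program counter): the
mapping loop's invariant, `rbx = m(i)`, MP2 – MP4 of the record under construction. -/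
structure Pt (u₀ : State) (g : Ghost) (i : Nat) (pc : Word) (A7 A7c Ai : Arena) (A : Arena × List Obj) (v : State) : Prop where
  loop : MapLoop u₀ g pc i A7 A7c Ai A v
  rbx : v.reg .rbx = addr (mapAt g v.mem i)
  cur : MapCur g (Since Ai A.1) v.mem i 11

/-- **The memory part of the invariant of the two `mux` loops** (4123 at `loop39`, 4129 at `loop38`) and of the points inside
them: `0 ≤ j ≤ C`, MP5 for the channels below `j`. -/
structure LoopCore (u₀ : State) (g : Ghost) (i : Nat) (pc : Word) (j : Nat) (A7 A7c Ai : Arena) (A : Arena × List Obj)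
    (v : State) : Prop where
  pt : Pt u₀ g i pc A7 A7c Ai A v
  j_le : (j : Int) ≤ stb_vorbis.channels v.mem g.f
  mux : ∀ j' : Nat, j' < j → Mapping.MuxOK v.mem (mapAt g v.mem i) j'

/-- **The invariant of the two `mux` loops**: `LoopCore` and `r13d = j`. -/
structure LoopPt (u₀ : State) (g : Ghost) (i : Nat) (pc : Word) (j : Nat) (A7 A7c Ai : Arena) (A : Arena × List Obj)
    (v : State) : Prop where
  core : LoopCore u₀ g i pc j A7 A7c Ai A v
  r13 : v.reg .r13 = addr j

/-- A point of the segment is the loops' invariant at `j = 0` (HD1: `1 ≤ channels`). -/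
theorem Pt.core0 {u₀ : State} {g : Ghost} {A7 A7c Ai : Arena} {A : Arena × List Obj} {i : Nat} {pc : Word} {v : State}
    (h : Pt u₀ g i pc A7 A7c Ai A v) : LoopCore u₀ g i pc 0 A7 A7c Ai A v := by
  have h1 := h.loop.mid.header.HD1
  refine ⟨h, ?_, ?_⟩
  · simp only [Int.natCast_zero] 
    omega
  · intro j' hj'
    omega

/-- The arena's blocks are live inside the function. -/
theorem Pt.arenaLive {u₀ : State} {g : Ghost} {A7 A7c Ai : Arena} {A : Arena × List Obj} {i : Nat} {pc : Word} {v : State}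
    (h : Pt u₀ g i pc A7 A7c Ai A v) : BlkLive A.1.Blk (g.Live A) :=
  fun B hB => h.loop.mid.env.live B (runBlk_setup hB)

/-- **A check site in the mapping record `m(i)`** (`m + 8` chan, `m + 16` submaps): inside the mapping table (MP1). -/
theorem Pt.site_rec {u₀ : State} {g : Ghost} {A7 A7c Ai : Arena} {A : Arena × List Obj} {i : Nat} {pc : Word} {v : State}
    (h : Pt u₀ g i pc A7 A7c Ai A v) (off n : Nat) (hoff : off + n ≤ 56) (hn : 1 ≤ n) :
    Site (g.Live A) (mapAt g v.mem i + off) n :=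
  h.loop.maps.upTo.site_record h.arenaLive h.cur.lt off n (by simp only [voff]; exact hoff) hn rfl

/-- **A check site in `*f`** (`f + 4` channels). -/
theorem Pt.site_f {u₀ : State} {g : Ghost} {A7 A7c Ai : Arena} {A : Arena × List Obj} {i : Nat} {pc : Word} {v : State}
    (h : Pt u₀ g i pc A7 A7c Ai A v) (off n : Nat) (hoff : off + n ≤ 1808) (hn : 1 ≤ n) :
    Site (g.Live A) (g.f + off) n :=
  h.loop.mid.bits.site_field h.loop.mid.env.live off n hoff hn rfl

/-- **The check site of `chan[j].mux`**, `j < C`: inside the `chan` block (MP2). -/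
theorem Pt.site_mux {u₀ : State} {g : Ghost} {A7 A7c Ai : Arena} {A : Arena × List Obj} {i : Nat} {pc : Word} {v : State}
    (h : Pt u₀ g i pc A7 A7c Ai A v) (j : Nat) (hj : (j : Int) < stb_vorbis.channels v.mem g.f) :
    Site (g.Live A) (Mapping.chan v.mem (mapAt g v.mem i) + 3 * j + 2) 1 := by
  apply Site.of_blk h.arenaLive h.cur.MP2.1
  · simp only []
    omega
  · simp only [nchan_def, voff]
    omega
  · omega

/-- The steady stack pointer as a word over the entry state's `rsp`, and the two constant slots the segment loads. -/
theorem Pt.words {u₀ : State} {g : Ghost} {A7 A7c Ai : Arena} {A : Arena × List Obj} {i : Nat} {pc : Word} {v : State}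
    (h : Pt u₀ g i pc A7 A7c Ai A v) :
    addr g.R = g.e.reg .rsp - 1480 ∧ addr g.f = g.e.reg .rdi ∧ v.mem.readLE (g.e.reg .rsp - 1444) 4 = 0 := by
  have hra := h.loop.frame.ra
  have hr := h.loop.frame.r_eq
  simp only [depth, steady] at hra hr
  have eRA : g.RA = (g.e.reg .rsp).toNat := rfl
  have e1 : addr g.R = g.e.reg .rsp - 1480 := by
    apply UInt64.toNat_inj.mp
    rw [toNat_addr _ (by omega)]
    u_omega
  have e2 : addr (g.R + 0x24) = g.e.reg .rsp - 1444 := by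
    apply UInt64.toNat_inj.mp
    rw [toNat_addr _ (by omega)]
    u_omega
  refine ⟨e1, addr_toNat _, ?_⟩
  have hz := h.loop.mid.consts.z24 (by omega) (by omega)
  unfold Mem.u32 at hz
  rw [e2] at hz
  exact hz

/-- `movsxd r12, r13d` of a small counter is the counter. -/
theorem sext_small (j : Nat) (hj : j ≤ 16) :
    Word.ofBV (BitVec.signExtend 64 (Word.part .w32 (UInt64.ofNat j))) = UInt64.ofNat j := by
  apply UInt64.toNat_inj.mp
  have e : (Word.part .w32 (UInt64.ofNat j)).toNat = j := by
    rw [part32_toNat]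
    u_omega
  rw [toNat_sext32 _ (by omega), e]
  u_omega

/-- **Where the record `m(i)` and its `chan` block are, and what the segment loads from `*f` and the record**: the numbers `C`
(channels, HD1) and `ch` (the `chan` pointer) with the two loads in the walker's form (`mw` = the word in rbx). -/
theorem Pt.loads {u₀ : State} {g : Ghost} {A7 A7c Ai : Arena} {A : Arena × List Obj} {i : Nat} {pc : Word} {v : State}
    (h : Pt u₀ g i pc A7 A7c Ai A v) (mw : Word) (hmw : mw = addr (mapAt g v.mem i)) :
    ∃ C ch : Nat, stb_vorbis.channels v.mem g.f = (C : Int) ∧ 1 ≤ C ∧ C ≤ 16 ∧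
      Mapping.chan v.mem (mapAt g v.mem i) = ch ∧
      v.mem.readLE (g.e.reg .rdi + 4) 4 = C ∧ v.mem.readLE (mw + 8) 8 = ch ∧ v.mem.readLE (mw + 16) 1 = Mapping.submaps v.mem (mapAt g v.mem i) ∧
      mw.toNat = mapAt g v.mem i ∧ 0x119d40 ≤ mw.toNat ∧ mw.toNat + 56 ≤ 0xC00000 ∧
      (mw.toNat + 56 ≤ 0x700000 ∨ 0x800000 ≤ mw.toNat) ∧
      0x119d40 ≤ ch ∧ ch + 3 * C ≤ 0xC00000 ∧ (ch + 3 * C ≤ 0x700000 ∨ 0x800000 ≤ ch) ∧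
      (mw.toNat + 56 ≤ ch ∨ ch + 3 * C ≤ mw.toNat) := by
  have hHD := h.loop.mid.header.HD1
  have ha : ArenaOK A.1 A.2 v.mem g.f := h.loop.mid.arena
  have htext : Vorbis.L.textHi ≤ A.1.B := h.loop.hand.arenaText
  have etext : Vorbis.L.textHi = 0x119d40 := rfl
  have hb := ha.bounds
  -- the mapping table
  have hB : A.1.Blk ⟨stb_vorbis.mapping v.mem g.f, Off.sizeof.Mapping * (stb_vorbis.mapping_count v.mem g.f).toNat⟩ :=
    h.loop.maps.upTo.MP1_block
  have hB1 := arena_inside ha hB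
  have hB2 := ha.blk_off_stack hB
  have hlt := h.cur.lt
  have hMP1 := h.loop.maps.MP1
  simp only [voff] at hB1 hB2
  -- the `chan` block
  have hK : A.1.Blk ⟨Mapping.chan v.mem (mapAt g v.mem i), Off.sizeof.MappingChannel * nchan v.mem g.f⟩ := h.cur.MP2.1
  have hK1 := arena_inside ha hK
  have hK2 := ha.blk_off_stack hK
  have hdis := ha.old_disjoint_since h.loop.maps.exti (h.loop.maps.MP1_block.1.mono h.loop.maps.ext7c) h.cur.MP2
  simp only [vblock, voff, nchan_def] at hdis
  simp only [voff, nchan_def] at hK1 hK2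
  have em : mapAt g v.mem i = stb_vorbis.mapping v.mem g.f + 56 * i := by
    simp only [mapAt, stb_vorbis.mapping_at, voff]
  have hmlt : mapAt g v.mem i < 2 ^ 64 := by omega
  have emw : mw.toNat = mapAt g v.mem i := by
    rw [hmw, toNat_addr _ hmlt]
  have hra := h.loop.frame.ra
  have hfw := f_where h.loop.frame h.loop.hand
  refine ⟨(stb_vorbis.channels v.mem g.f).toNat, Mapping.chan v.mem (mapAt g v.mem i), by omega, by omega, by omega, rfl,
    ?_, ?_, ?_, emw, by omega, by omega, by omega, by omega, by omega, by omega, by omega⟩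
  · have e1 : g.e.reg .rdi + 4 = addr (g.f + 4) := by
      rw [← addr_toNat (g.e.reg .rdi), addr_add_lit]
      rfl
    rw [e1]
    have hc := v.mem.i32_cases (g.f + 4)
    have hch : stb_vorbis.channels v.mem g.f = v.mem.i32 (g.f + 4) := by
      simp only [vacc, voff]
    have hu : v.mem.readLE (addr (g.f + 4)) 4 = v.mem.u32 (g.f + 4) := rfl
    rw [hu]
    omega
  · rw [hmw, addr_add_lit]
    simp only [vacc, voff]
    rfl
  · rw [hmw, addr_add_lit]
    simp only [vacc, voff]
    rfl

/-- **MP5 of a finished channel over a quiet change**: the `mux` byte of channel `j' ≠ jx` and `submaps` read the same. -/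
theorem Quiet.mux_carry {g : Ghost} {A7 A7c Ai A : Arena} {i jx : Nat} {mem mem' : Mem} (q : Quiet g Ai i jx mem mem')
    (ht : MapTrans A7 A7c Ai A mem g.f i) (hc : MapCur g (Since Ai A) mem i 11) {j' : Nat}
    (hj' : (j' : Int) < stb_vorbis.channels mem g.f) (hne : j' ≠ jx) (h : Mapping.MuxOK mem (mapAt g mem i) j') :
    Mapping.MuxOK mem' (mapAt g mem' i) j' := by
  obtain ⟨_, eat⟩ := q.cur_carry ht hc
  have hm := q.record_kept ht i hc.lt
  have e1 : Mapping.chan mem' (mapAt g mem i) = Mapping.chan mem (mapAt g mem i) := by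
    simp only [vacc, voff]
    exact hm.u64 _ (by simp only [mapAt]; omega) (by simp only [mapAt, voff]; omega)
  have e2 : Mapping.submaps mem' (mapAt g mem i) = Mapping.submaps mem (mapAt g mem i) := by
    simp only [vacc, voff]
    exact hm.u8 _ (by simp only [mapAt]; omega) (by simp only [mapAt, voff]; omega)
  have ech : Mapping.chan_at mem' (mapAt g mem i) j' = Mapping.chan_at mem (mapAt g mem i) j' := by
    unfold Mapping.chan_at
    rw [e1]
  have c2 := q.chan j' 2 hj' (by omega) (fun _ => hne)
  rw [eat]
  unfold Mapping.MuxOK at h ⊢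
  simp only [MappingChannel.mux, voff] at h ⊢
  rw [ech, c2, e2]
  exact h

/-- **`Pt` at the state `s` after a quiet change since `v`** (`rbp`, `rbx` not written). -/
theorem Pt.carry {u₀ : State} {g : Ghost} {A7 A7c Ai : Arena} {A : Arena × List Obj} {i jx : Nat} {pc pc' : Word} {v s : State}
    (hpt : Pt u₀ g i pc A7 A7c Ai A v) (q : Quiet g Ai i jx v.mem s.mem) (hbits : Bits (g.Blk A) g.len s.mem g.f)
    (hrip : s.rip = pc') (hrsp : s.reg .rsp = addr g.R) (hrbp : s.reg .rbp = v.reg .rbp) (hrbx : s.reg .rbx = v.reg .rbx)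
    (hcode : CodeOK u₀ s.mem) (hinv : abiInv s) : Pt u₀ g i pc' A7 A7c Ai A s := by
  have hcar := q.carry hpt.loop hpt.cur hbits hrip hrsp (by rw [hrbp]; exact hpt.loop.rbp) hcode hinv
  refine ⟨hcar.1, ?_, hcar.2.1⟩
  rw [hrbx, hcar.2.2]
  exact hpt.rbx

/-- **`LoopCore` at the state `s` after a quiet change since `v`** that keeps the `mux` bytes below `j` (`jx ≥ j`). -/
theorem LoopCore.carry {u₀ : State} {g : Ghost} {A7 A7c Ai : Arena} {A : Arena × List Obj} {i j jx : Nat} {pc pc' : Word}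
    {v s : State} (h : LoopCore u₀ g i pc j A7 A7c Ai A v) (q : Quiet g Ai i jx v.mem s.mem) (hjx : j ≤ jx)
    (hbits : Bits (g.Blk A) g.len s.mem g.f) (hrip : s.rip = pc') (hrsp : s.reg .rsp = addr g.R)
    (hrbp : s.reg .rbp = v.reg .rbp) (hrbx : s.reg .rbx = v.reg .rbx)
    (hcode : CodeOK u₀ s.mem) (hinv : abiInv s) : LoopCore u₀ g i pc' j A7 A7c Ai A s := by
  obtain ⟨eC, _, _⟩ := q.scalars
  refine ⟨h.pt.carry q hbits hrip hrsp hrbp hrbx hcode hinv, ?_, ?_⟩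
  · rw [eC]
    exact h.j_le
  · intro j' hj'
    have hjl := h.j_le
    exact q.mux_carry h.pt.loop.maps h.pt.cur (by omega) (by omega) (h.mux j' hj')

/-- **What a check call, `error` and the spill write**: the stack below `R`, `[R + 18H]`, `f->error` (with `setup_offset`'s
neighbour: the reader's third window). -/
def narrowWins (g : Ghost) : List Span :=
  [⟨g.R - 400, g.R⟩, ⟨g.R + 0x18, g.R + 0x1c⟩, ⟨g.f + 136, g.f + 144⟩]

/-- A change inside `narrowWins` is a change inside `offWins`, and keeps `Bits` (none of its four windows is met). -/
theorem narrow_ok {u₀ : State} {g : Ghost} {pc : Word} {A : Arena × List Obj} {v : State} {mem mem' : Mem}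
    (hfr : Frame u₀ g pc A v) (hhand : g.Hand A) {Blk : Block → Prop} (hb : Bits Blk g.len mem g.f)
    (hs : Mem.SameExcept (narrowWins g) mem mem') :
    Mem.SameExcept (offWins g) mem mem' ∧ Bits Blk g.len mem' g.f := by
  have hra := hfr.ra
  have hr := hfr.r_eq
  simp only [depth, steady] at hra hr
  have hfw := f_where hfr hhand
  constructor
  · apply hs.mono
    intro w hw a h1 h2
    simp only [narrowWins, List.mem_cons, List.mem_nil_iff, or_false] at hw
    rcases hw with rfl | rfl | rfl
    · exact ⟨_, List.mem_cons_self, h1, h2⟩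
    · exact ⟨_, List.mem_cons_of_mem _ List.mem_cons_self, h1, h2⟩
    · exact ⟨⟨g.f + 136, g.f + 144⟩, by simp only [offWins, List.mem_cons, true_or, or_true], h1, h2⟩
  · apply hb.frame_fields
    have hreg : ∀ lo hi : Nat, g.f + 48 ≤ lo → hi ≤ g.f + 1808 → (hi ≤ g.f + 136 ∨ g.f + 144 ≤ lo) →
        Mem.EqOn lo hi mem mem' := by
      intro lo hi h1 h2 h3
      apply hs.eqOn
      intro w hw
      simp only [narrowWins, List.mem_cons, List.mem_nil_iff, or_false] at hw
      rcases hw with rfl | rfl | rfl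
      all_goals simp only []
      all_goals omega
    exact ⟨hreg _ _ (by omega) (by omega) (by omega), hreg _ _ (by omega) (by omega) (by omega),
      hreg _ _ (by omega) (by omega) (by omega), hreg _ _ (by omega) (by omega) (by omega)⟩

set_option maxRecDepth 4000 in
/-- The return address of a call from the steady frame (`[R − 8, R)`) lies in `narrowWins`. -/
theorem narrow_push {u₀ : State} {g : Ghost} {pc : Word} {A : Arena × List Obj} {v : State} (hfr : Frame u₀ g pc A v)
    (M : Mem) (y : Nat) : Mem.SameExcept (narrowWins g) M (M.writeLE (g.e.reg .rsp - 1488) 8 y) := by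
  have hra := hfr.ra
  have hr := hfr.r_eq
  simp only [depth, steady] at hra hr
  have eRA : g.RA = (g.e.reg .rsp).toNat := rfl
  apply Mem.SameExcept.writeLE
  · u_omega
  · refine ⟨⟨g.R - 400, g.R⟩, List.mem_cons_self, ?_, ?_⟩
    · simp only []
      u_omega
    · simp only []
      u_omega

/-- The spill slot `[R + 18H, R + 1CH)` lies in `narrowWins`. -/
theorem narrow_spill {u₀ : State} {g : Ghost} {pc : Word} {A : Arena × List Obj} {v : State} (hfr : Frame u₀ g pc A v)
    (M : Mem) (y : Nat) : Mem.SameExcept (narrowWins g) M (M.writeLE (g.e.reg .rsp - 1456) 4 y) := by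
  have hra := hfr.ra
  have hr := hfr.r_eq
  simp only [depth, steady] at hra hr
  have eRA : g.RA = (g.e.reg .rsp).toNat := rfl
  apply Mem.SameExcept.writeLE
  · u_omega
  · refine ⟨⟨g.R + 0x18, g.R + 0x1c⟩, List.mem_cons_of_mem _ List.mem_cons_self, ?_, ?_⟩
    · simp only []
      u_omega
    · simp only []
      u_omega

/-- The footprint of `error` called from the steady frame (its 48 bytes of stack below the return address, `f->error`) lies in
`narrowWins`. -/
theorem narrow_error {u₀ : State} {g : Ghost} {pc : Word} {A : Arena × List Obj} {v : State} (hfr : Frame u₀ g pc A v)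
    {M M' : Mem}
    (h : Mem.SameExcept [⟨(g.e.reg .rsp - 1488).toNat - 48, (g.e.reg .rsp - 1488).toNat⟩,
      ⟨(g.e.reg .rdi).toNat + 140, (g.e.reg .rdi).toNat + 140 + 4⟩] M M') : Mem.SameExcept (narrowWins g) M M' := by
  have hra := hfr.ra
  have hr := hfr.r_eq
  simp only [depth, steady] at hra hr
  have eRA : g.RA = (g.e.reg .rsp).toNat := rfl
  have ef : g.f = (g.e.reg .rdi).toNat := rfl
  have e1 : (g.e.reg .rsp - 1488).toNat = g.R - 8 := by u_omega
  apply h.mono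
  intro w hw a h1 h2
  simp only [List.mem_cons, List.mem_nil_iff, or_false] at hw
  rcases hw with rfl | rfl
  · simp only [e1] at h1 h2
    exact ⟨⟨g.R - 400, g.R⟩, List.mem_cons_self, by simp only []; omega, by simp only []; omega⟩
  · simp only [← ef] at h1 h2
    exact ⟨⟨g.f + 136, g.f + 144⟩, by simp only [narrowWins, List.mem_cons, true_or, or_true], by simp only []; omega,
      by simp only []; omega⟩

/-- The byte that `movzx eax, byte [m] ; mov [m'], al` moves. -/
theorem byte_roundtrip (x : Nat) : (BitVec.setWidth 8 (BitVec.zeroExtend 32 (BitVec.ofNat 8 x))).toNat = x % 256 := by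
  simp only [BitVec.toNat_setWidth, BitVec.toNat_ofNat, BitVec.zeroExtend]
  omega

/-- **The store of `chan[jx].mux` on top of a change inside `offWins` is quiet** (but for that byte): the `chan` block of the
record under construction was allocated since `Ai`, so every older block is kept (THE AGES OF THE BLOCKS); it lies in the arena,
off the stack, off `*f`, off `log2_4`. -/
theorem Quiet.store {u₀ : State} {g : Ghost} {A7 A7c Ai : Arena} {A : Arena × List Obj} {i : Nat} {pc : Word} {v : State}
    {mem1 : Mem} (hl : MapLoop u₀ g pc i A7 A7c Ai A v) (hc : MapCur g (Since Ai A.1) v.mem i 11)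
    (hs : Mem.SameExcept (offWins g) v.mem mem1) (jx : Nat) (hjx : (jx : Int) < stb_vorbis.channels v.mem g.f) (x : Nat) :
    Quiet g Ai i jx v.mem (mem1.writeLE (addr (Mapping.chan v.mem (mapAt g v.mem i) + 3 * jx + 2)) 1 x) := by
  have q1 := Quiet.of_off hl hc hs jx
  have hra := hl.frame.ra
  have hr := hl.frame.r_eq
  simp only [depth, steady] at hra hr
  have hfw := f_where hl.frame hl.hand
  have ha : ArenaOK A.1 A.2 v.mem g.f := hl.mid.arena
  have hout := hl.hand.objOut
  simp only [voff] at hout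
  have hHD := hl.mid.header.HD1
  have hK : A.1.Blk ⟨Mapping.chan v.mem (mapAt g v.mem i), Off.sizeof.MappingChannel * nchan v.mem g.f⟩ := hc.MP2.1
  have hK1 := arena_inside ha hK
  have hK2 := ha.blk_off_stack hK
  have hb := ha.bounds
  have hlog := hl.hand.outside ⟨0x120640, 16⟩ (by simp only [fixedBlocks, globalBlocks, List.mem_cons, true_or, or_true])
  simp only [voff, nchan_def] at hK1 hK2 hlog
  generalize hch : Mapping.chan v.mem (mapAt g v.mem i) = ch at *
  have hcont : (Block.mk ch (Off.sizeof.MappingChannel * nchan v.mem g.f)).contains (ch + 3 * jx + 2) 1 := by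
    simp only [vblock, voff, nchan_def]
    omega
  have hw : (addr (ch + 3 * jx + 2)).toNat = ch + 3 * jx + 2 := toNat_addr _ (by omega)
  have hreg : ∀ lo n : Nat, (lo + n ≤ A.1.B ∨ A.1.B + A.1.L ≤ lo) →
      Mem.EqOn lo (lo + n) mem1 (mem1.writeLE (addr (ch + 3 * jx + 2)) 1 x) := by
    intro lo n h1
    apply Mem.eqOn_writeLE
    · rw [hw]
      omega
    · rw [hw]
      omega
  have hstk : ∀ lo n : Nat, 0x700000 ≤ lo → lo + n ≤ 0x800000 →
      Mem.EqOn lo (lo + n) mem1 (mem1.writeLE (addr (ch + 3 * jx + 2)) 1 x) := by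
    intro lo n h1 h2
    apply Mem.eqOn_writeLE
    · rw [hw]
      omega
    · rw [hw]
      omega
  refine ⟨?_, ?_, ?_, ?_, ?_, ?_, ?_, ?_, ?_⟩
  · apply q1.obj.trans
    apply ObjEq.of_writeLE
    · rw [hw]
      omega
    · intro w hw'
      simp only [quietWins, List.mem_cons, List.mem_nil_iff, or_false] at hw'
      rcases hw' with rfl | rfl | rfl | rfl | rfl
      all_goals simp only []
      all_goals omega
    · intro w hw'
      rw [hw]
      simp only [quietWins, List.mem_cons, List.mem_nil_iff, or_false] at hw'
      rcases hw' with rfl | rfl | rfl | rfl | rfl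
      all_goals simp only []
      all_goals omega
  · intro B hB
    apply (q1.old B hB).trans
    exact Block.Kept.of_writeLE mem1 _ 1 x (ha.old_disjoint_since hl.maps.exti hB hc.MP2) (hch ▸ hcont)
      (ha.blkOK.no_wrap hc.MP2.1) (ha.blkOK.no_wrap (hB.mono hl.maps.exti))
  · intro k o hk ho hne
    rw [← q1.chan k o hk ho hne]
    unfold Mapping.chan_at
    rw [hch]
    apply Mem.u8_writeLE
    · rw [hw]
      omega
    · simp only [voff]
      omega
    · rw [hw]
      simp only [voff]
      omega
  · exact q1.lo.trans ((hstk (g.R + 8) 16 (by omega) (by omega)).mono (Nat.le_refl _) (by omega))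
  · exact q1.mid.trans ((hstk (g.R + 0x20) 12 (by omega) (by omega)).mono (Nat.le_refl _) (by omega))
  · exact q1.hi.trans ((hstk (g.R + 0x598) 56 (by omega) (by omega)).mono (Nat.le_refl _) (by omega))
  · apply Mem.EqOn.trans q1.shadow
    apply (Mem.eqOn_writeLE mem1 _ 1 x 0xC00000 0x200000 _ _).mono (Nat.le_refl _) (by omega)
    · rw [hw]
      omega
    · rw [hw]
      omega
  · exact q1.log2.trans ((hreg 0x120640 16 (by omega)).mono (Nat.le_refl _) (by omega))
  · apply q1.foot.trans
    apply Mem.SameExcept.writeLE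
    · rw [hw]
      omega
    · rw [hw]
      have hext := hl.frame.ext
      refine ⟨⟨g.A0.1.B, g.A0.1.B + g.A0.1.L⟩, ?_, ?_, ?_⟩
      · unfold StartDecoder.footprint StartDecoder.writes
        simp only [List.mem_cons, true_or, or_true]
      · simp only []
        rw [← hext.B]
        omega
      · simp only []
        rw [← hext.B, ← hext.L]
        omega

/-- **`Bits` over the store of `chan[jx].mux`**: the arena does not meet `*f`. -/
theorem bits_store {u₀ : State} {g : Ghost} {A7 A7c Ai : Arena} {A : Arena × List Obj} {i : Nat} {pc : Word} {v : State}
    {mem1 : Mem} (hl : MapLoop u₀ g pc i A7 A7c Ai A v) (hc : MapCur g (Since Ai A.1) v.mem i 11) {Blk : Block → Prop}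
    (hb : Bits Blk g.len mem1 g.f) (jx : Nat) (hjx : (jx : Int) < stb_vorbis.channels v.mem g.f) (x : Nat) :
    Bits Blk g.len (mem1.writeLE (addr (Mapping.chan v.mem (mapAt g v.mem i) + 3 * jx + 2)) 1 x) g.f := by
  have ha : ArenaOK A.1 A.2 v.mem g.f := hl.mid.arena
  have hout := hl.hand.objOut
  have hK1 := arena_inside ha hc.MP2.1
  have hbd := ha.bounds
  have hfw := f_where hl.frame hl.hand
  simp only [voff, nchan_def] at hK1 hout
  apply hb.frame_fields
  apply Bits.SameFields.of_writeLE
  all_goals omega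

/-- The loop test `cmp [rbp+4], r13d ; jle / jg` on small numbers. -/
theorem cmp_small (C j : Nat) (hC : C ≤ 16) (hj : j ≤ 16) :
    ((BitVec.ofNat 32 C).toInt ≤ (Word.part .w32 (UInt64.ofNat j)).toInt) ↔ C ≤ j := by
  have e1 : (BitVec.ofNat 32 C).toInt = (C : Int) := by
    rw [toInt_ofNat32 C (by omega)]
    unfold sint32
    rw [if_pos (by omega)]
  have e2 : Word.part .w32 (UInt64.ofNat j) = BitVec.ofNat 32 j := by
    apply BitVec.eq_of_toNat_eq
    rw [part32_toNat, BitVec.toNat_ofNat]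
    have : (UInt64.ofNat j).toNat = j := by u_omega
    rw [this]
  have e3 : (BitVec.ofNat 32 j).toInt = (j : Int) := by
    rw [toInt_ofNat32 j (by omega)]
    unfold sint32
    rw [if_pos (by omega)]
  rw [e1, e2, e3]
  omega

/-- `add r13d, 1` on a small counter. -/
theorem inc_small (j : Nat) (hj : j ≤ 16) : Word.ofBV (Word.part .w32 (UInt64.ofNat j) + 1#32) = addr (j + 1) := by
  have e2 : Word.part .w32 (UInt64.ofNat j) = BitVec.ofNat 32 j := by
    apply BitVec.eq_of_toNat_eq
    rw [part32_toNat, BitVec.toNat_ofNat]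
    have : (UInt64.ofNat j).toNat = j := by u_omega
    rw [this]
  apply UInt64.toNat_inj.mp
  rw [toNat_addr _ (by omega), toNat_ofBV32, e2, BitVec.toNat_add, BitVec.toNat_ofNat]
  have e1 : (1#32).toNat = 1 := by decide
  rw [e1]
  omega

/-- **One more channel done**: the invariant at `j + 1` from the invariant at `j` and MP5 of channel `j`. -/
theorem LoopCore.succ {u₀ : State} {g : Ghost} {A7 A7c Ai : Arena} {A : Arena × List Obj} {i j : Nat} {pc : Word} {s : State}
    (h : LoopCore u₀ g i pc j A7 A7c Ai A s) (hj : (j : Int) < stb_vorbis.channels s.mem g.f)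
    (hm : Mapping.MuxOK s.mem (mapAt g s.mem i) j) : LoopCore u₀ g i pc (j + 1) A7 A7c Ai A s := by
  refine ⟨h.pt, by omega, ?_⟩
  intro j' hj'
  by_cases e : j' = j
  · subst e
    exact hm
  · exact h.mux j' (by omega)

/-- **MP5 of the channel just stored**, in the memory after the store: the byte read back is below `submaps`. -/
theorem Quiet.mux_new {g : Ghost} {A7 A7c Ai A : Arena} {i jx : Nat} {mem mem' : Mem} (q : Quiet g Ai i jx mem mem')
    (ht : MapTrans A7 A7c Ai A mem g.f i) (hc : MapCur g (Since Ai A) mem i 11)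
    (hval : mem'.u8 (Mapping.chan mem (mapAt g mem i) + 3 * jx + 2) < Mapping.submaps mem (mapAt g mem i)) :
    Mapping.MuxOK mem' (mapAt g mem' i) jx := by
  obtain ⟨_, eat⟩ := q.cur_carry ht hc
  have hm := q.record_kept ht i hc.lt
  have e1 : Mapping.chan mem' (mapAt g mem i) = Mapping.chan mem (mapAt g mem i) := by
    simp only [vacc, voff]
    exact hm.u64 _ (by simp only [mapAt]; omega) (by simp only [mapAt, voff]; omega)
  have e2 : Mapping.submaps mem' (mapAt g mem i) = Mapping.submaps mem (mapAt g mem i) := by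
    simp only [vacc, voff]
    exact hm.u8 _ (by simp only [mapAt]; omega) (by simp only [mapAt, voff]; omega)
  rw [eat]
  unfold Mapping.MuxOK
  simp only [MappingChannel.mux, Mapping.chan_at, voff]
  rw [e1, e2]
  exact hval

/-- **The error exit**: a point of the segment at the epilogue with `eax = 0` is `AtERR` (SD.ERR: H2, H3 from the finished residue
group, H5 from MAPS(i)). -/
theorem Pt.err {u₀ : State} {g : Ghost} {A7 A7c Ai : Arena} {A : Arena × List Obj} {i : Nat} {s : State}
    (h : Pt u₀ g i pc_ERR A7 A7c Ai A s) (hrax : (s.reg .rax).toNat % 2 ^ 32 = 0) : AtERR u₀ g s := by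
  have h5 : H5 (g.Blk A) s.mem g.f :=
    H5.mono (MappingDeinitOK.h5 h.loop.maps.upTo.deinit h.loop.maps.MP1.2) (fun _ hB => runBlk_setup hB)
  have hf : Failed g.len g.f (g.Live A) A s.mem :=
    h.loop.mid.failed (by omega) (h.loop.mid.h2_done (by omega)) (h.loop.mid.h3_done (by omega)) h5
  exact ⟨A, h.loop.frame, h.loop.hand, Or.inl ⟨hrax, hf⟩⟩

/-- **The exit to R12**: the loops' invariant at `pc_R12` with every channel done (`C ≤ j`) and `r13d = 0` is `AtR12` (MP5). -/
theorem LoopCore.r12 {u₀ : State} {g : Ghost} {A7 A7c Ai : Arena} {A : Arena × List Obj} {i j : Nat} {s : State}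
    (h : LoopCore u₀ g i pc_R12 j A7 A7c Ai A s) (hj : stb_vorbis.channels s.mem g.f ≤ (j : Int))
    (hr13 : s.reg .r13 = addr 0) : AtR12 u₀ g i s := by
  refine ⟨A7, A7c, Ai, A, h.pt.loop, h.pt.rbx, hr13, ?_⟩
  have hc := h.pt.cur
  refine ⟨hc.lt, hc.MP2, hc.MP3, hc.MP4_steps, ?_, ?_, ?_⟩
  · intro h10
    omega
  · intro _
    exact hc.MP4 (by omega)
  · intro _ j' hj'
    exact h.mux j' (by omega)

end Vorbis.Spec.start_decoder_R11
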